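-- pv_equiv track=rewrite | github.com/Orcadebug/Herme | backend/tests/test_basketball_multi_agent.py | _pick_action
-- ===== SOURCE A (Python) =====
-- def _pick_action(content: str, allowed_actions):
--     if not allowed_actions:
--         return ""
--     if "agent_type=coach" in content:
--         for option in ("spread_pnr", "switch", "man", "motion"):
--             if option in allowed_actions:
--                 return option
--     if "agent_type=referee" in content:
--         for option in ("play_on", "no_call"):
--             if option in allowed_actions:
--                 return option
--     for option in (
--         "come_to_ball",
--         "get_open",
--         "contain",
--         "screen",
--         "shoot",
--         "secure",
--         "box_out",
--         "tag",
--         "reset",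
--     ):
--         if option in allowed_actions:
--             return option
--     return allowed_actions[0]
-- ===== SOURCE B (Python) =====
-- def _pick_action(content: str, allowed_actions):
--     if not allowed_actions:
--         return ""
--     candidates = []
--     if "agent_type=coach" in content:
--         candidates += ["spread_pnr", "switch", "man", "motion"]
--     if "agent_type=referee" in content:
--         candidates += ["play_on", "no_call"]
--     candidates += [
--         "come_to_ball",
--         "get_open",
--         "contain",
--         "screen",
--         "shoot",
--         "secure",
--         "box_out",
--         "tag",
--         "reset",
--     ]
--     rank = {c: i for i, c in enumerate(candidates)}
--     best = None
--     for action in allowed_actions: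
--         r = rank.get(action)
--         if r is not None and (best is None or r < best[0]):
--             best = (r, action)
--     return best[1] if best is not None else allowed_actions[0]
-- ===== Notes on version B (the rewrite author's own statement) =====
-- stated objective: alternative
-- what changed: B inverts the traversal: it builds a hash index mapping each applicable priority option to its rank once, then makes a single pass over allowed_actions keeping the minimum-rank action, instead of A's membership scans of allowed_actions for each candidate in priority order.
import Mathlib
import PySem

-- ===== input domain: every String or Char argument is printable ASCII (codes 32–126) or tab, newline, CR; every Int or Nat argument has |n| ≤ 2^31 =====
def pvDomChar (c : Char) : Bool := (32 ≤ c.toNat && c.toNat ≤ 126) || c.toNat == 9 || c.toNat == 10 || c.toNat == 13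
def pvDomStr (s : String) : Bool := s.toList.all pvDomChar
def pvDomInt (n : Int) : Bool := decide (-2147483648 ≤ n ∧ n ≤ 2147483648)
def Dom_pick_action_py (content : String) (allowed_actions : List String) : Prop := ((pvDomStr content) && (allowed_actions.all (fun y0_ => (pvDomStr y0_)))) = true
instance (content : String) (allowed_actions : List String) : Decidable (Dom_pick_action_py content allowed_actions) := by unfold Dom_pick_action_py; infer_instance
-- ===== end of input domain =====

-- B replaces A's per-candidate membership scans by a rank index over the candidates
-- plus one minimum-rank pass over allowed_actions (objective: alternative).

-- ===== PORT A =====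
-- A's 'for option in (...): if option in allowed_actions: return option' loop, literal recursion
def pvLoopA (opts : List String) (allowed : List String) : Option String :=
  match opts with
  | [] => none
  | o :: rest => if allowed.contains o then some o else pvLoopA rest allowed

def pick_action_py (content : String) (allowed_actions : List String) : String :=
  if allowed_actions.isEmpty then ""
  else
    match (if PySem.Str.isIn "agent_type=coach" content then
             pvLoopA ["spread_pnr", "switch", "man", "motion"] allowed_actions else none) with
    | some o => o
    | none =>
      match (if PySem.Str.isIn "agent_type=referee" content then
               pvLoopA ["play_on", "no_call"] allowed_actions else none) with
      | some o => o
      | none =>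
        match pvLoopA ["come_to_ball", "get_open", "contain", "screen", "shoot",
                       "secure", "box_out", "tag", "reset"] allowed_actions with
        | some o => o
        | none => allowed_actions.headD ""   -- allowed_actions[0]; list nonempty here

-- ===== PORT B =====
-- rank = {c: i for i, c in enumerate(candidates)}
def pvRank (cands : List String) : PySem.Dict String Int :=
  (PySem.List.enumerate cands 0).foldl (fun d p => d.insert p.2 p.1) PySem.Dict.empty

-- the body of B's 'for action in allowed_actions' loop
def pvStep (rank : PySem.Dict String Int) (best : Option (Int × String)) (action : String) :
    Option (Int × String) :=
  match rank.get? action with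
  | none => best
  | some r =>
    match best with
    | none => some (r, action)
    | some p => if r < p.1 then some (r, action) else best

def pick_action_py_alt (content : String) (allowed_actions : List String) : String :=
  if allowed_actions.isEmpty then ""
  else
    let candidates :=
      (if PySem.Str.isIn "agent_type=coach" content then
        ["spread_pnr", "switch", "man", "motion"] else []) ++
      (if PySem.Str.isIn "agent_type=referee" content then
        ["play_on", "no_call"] else []) ++
      ["come_to_ball", "get_open", "contain", "screen", "shoot",
       "secure", "box_out", "tag", "reset"]
    let rank := pvRank candidates
    match allowed_actions.foldl (pvStep rank) none with
    | some best => best.2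
    | none => allowed_actions.headD ""   -- allowed_actions[0]; list nonempty here

-- ===== PRECONDITION & SPEC =====
def Spec_pick_action_py (content : String) (allowed_actions : List String) (out : String) : Prop := out = pick_action_py_alt content allowed_actions
instance (content : String) (allowed_actions : List String) (out : String) : Decidable (Spec_pick_action_py content allowed_actions out) := by unfold Spec_pick_action_py; infer_instance

-- ===== CLAIM (what is proved, stated in full; the proofs are below) =====
def Claim_equal_pick_action_py : Prop := ∀ (content : String) (allowed_actions : List String), Dom_pick_action_py content allowed_actions → Spec_pick_action_py content allowed_actions (pick_action_py content allowed_actions)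

-- ===== LEMMAS AND PROOFS =====

-- proof-side abstractions: rank of a candidate as first index, and the loop step over a rank FUNCTION
def pvIdx : List String → String → Option Nat
  | [], _ => none
  | c :: rest, a => if c = a then some 0 else (pvIdx rest a).map (· + 1)

def pvRk (cands : List String) (a : String) : Option Int :=
  (pvIdx cands a).map (fun k : Nat => (k : Int))

def pvStepF (rk : String → Option Int) (best : Option (Int × String)) (action : String) :
    Option (Int × String) :=
  match rk action with
  | none => best
  | some r =>
    match best with
    | none => some (r, action)
    | some p => if r < p.1 then some (r, action) else best

theorem pvLoopA_eq_find? (opts allowed : List String) :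
    pvLoopA opts allowed = opts.find? (fun c => allowed.contains c) := by
  induction opts with
  | nil => rfl
  | cons o rest ih =>
    by_cases h : o ∈ allowed
    · simp [pvLoopA, List.find?, h]
    · simp [pvLoopA, List.find?, h, ih]

-- the rank dict of a duplicate-free candidate list looks up the first index
theorem pvIdx_none (cs : List String) (a : String) (h : a ∉ cs) : pvIdx cs a = none := by
  induction cs with
  | nil => rfl
  | cons x xs ih =>
    simp only [List.mem_cons, not_or] at h
    have hxa : ¬ x = a := fun hx => h.1 hx.symm
    simp [pvIdx, hxa, ih h.2]

theorem pvRank_get_aux (cands : List String) (hnd : cands.Nodup) (s : Int)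
    (d : PySem.Dict String Int) (a : String) :
    ((PySem.List.enumerate cands s).foldl (fun d p => d.insert p.2 p.1) d).get? a
      = ((pvIdx cands a).map (fun k : Nat => s + (k : Int))).or (d.get? a) := by
  induction cands generalizing s d with
  | nil => simp [PySem.List.enumerate, pvIdx]
  | cons c cs ih =>
    rw [PySem.List.enumerate_cons]
    simp only [List.foldl_cons]
    rw [ih (List.nodup_cons.mp hnd).2 (s + 1) (d.insert c s)]
    by_cases hca : c = a
    · subst hca
      simp [pvIdx, pvIdx_none cs c (List.nodup_cons.mp hnd).1,
        PySem.Dict.get?_insert_self]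
    · rw [PySem.Dict.get?_insert_of_ne d s (fun h => hca h.symm)]
      cases hpi : pvIdx cs a with
      | none => simp [pvIdx, if_neg hca, hpi]
      | some k =>
        simp only [pvIdx, if_neg hca, hpi, Option.map_some, Option.some_or,
          Option.some.injEq]
        push_cast
        ring

theorem pvRank_get (cands : List String) (hnd : cands.Nodup) (a : String) :
    (pvRank cands).get? a = pvRk cands a := by
  rw [pvRank, pvRank_get_aux cands hnd 0 PySem.Dict.empty a]
  simp [pvRk, PySem.Dict.get?_empty]


theorem pvStep_eq_stepF (cands : List String) (hnd : cands.Nodup) :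
    pvStep (pvRank cands) = pvStepF (pvRk cands) := by
  funext b a
  simp [pvStep, pvStepF, pvRank_get cands hnd]

-- ranks delivered by pvRk are nonnegative
theorem pvRk_nonneg (cands : List String) (a : String) (r : Int)
    (h : pvRk cands a = some r) : 0 ≤ r := by
  rcases Option.map_eq_some_iff.mp h with ⟨k, -, hk⟩
  exact hk ▸ Int.natCast_nonneg k

-- once the fold holds (0, c) it never changes (all ranks are ≥ 0)
theorem pvFold_keep_zero (rk : String → Option Int)
    (h0 : ∀ a r, rk a = some r → 0 ≤ r) (c : String) :
    ∀ rest : List String, rest.foldl (pvStepF rk) (some (0, c)) = some (0, c) := by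
  intro rest
  induction rest with
  | nil => rfl
  | cons a xs ih =>
    have hstep : pvStepF rk (some (0, c)) a = some (0, c) := by
      unfold pvStepF
      cases h : rk a with
      | none => rfl
      | some r => simp [Int.not_lt.mpr (h0 a r h)]
    simp [hstep, ih]

-- if c has rank 0 and is allowed, the minimum-rank pass returns (0, c)
theorem pvFold_zero (rk : String → Option Int) (c : String)
    (h0 : ∀ a r, rk a = some r → 0 ≤ r)
    (hz : ∀ a, rk a = some 0 → a = c) (hc : rk c = some 0) :
    ∀ (allowed : List String) (acc : Option (Int × String)),
      c ∈ allowed →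
      (acc = none ∨ ∃ r a, acc = some (r, a) ∧ 0 ≤ r ∧ (r = 0 → a = c)) →
      allowed.foldl (pvStepF rk) acc = some (0, c) := by
  intro allowed
  induction allowed with
  | nil => intro acc h; exact absurd h (by simp)
  | cons a rest ih =>
    intro acc hmem hinv
    by_cases hac : a = c
    · subst hac
      have hstep : pvStepF rk acc a = some (0, a) := by
        unfold pvStepF
        rw [hc]
        rcases hinv with h | ⟨r, b, hb, hr, hbz⟩
        · simp [h]
        · subst hb
          by_cases hpos : (0 : Int) < r
          · simp [hpos]
          · have : r = 0 := le_antisymm (Int.not_lt.mp hpos) hr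
            simp [this, hbz this]
      simp only [List.foldl_cons, hstep]
      exact pvFold_keep_zero rk h0 a rest
    · have hmem' : c ∈ rest := by
        rcases List.mem_cons.mp hmem with h | h
        · exact absurd h.symm hac
        · exact h
      apply ih _ hmem'
      unfold pvStepF
      cases h : rk a with
      | none => exact hinv
      | some r =>
        have hr0 : 0 ≤ r := h0 a r h
        have hrz : r = 0 → a = c := fun hz0 => hz a (hz0 ▸ h)
        rcases hinv with hn | ⟨rb, b, hb, hrb, hbz⟩
        · right; exact ⟨r, a, by simp [hn], hr0, hrz⟩
        · subst hb
          by_cases hlt : r < rb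
          · right; exact ⟨r, a, by simp [hlt], hr0, hrz⟩
          · right; exact ⟨rb, b, by simp [hlt], hrb, hbz⟩

-- shifting every rank by +1 commutes with the minimum-rank pass
theorem pvFold_shift (rk1 rk2 : String → Option Int) :
    ∀ (allowed : List String) (acc : Option (Int × String)),
      (∀ a ∈ allowed, rk1 a = (rk2 a).map (· + 1)) →
      allowed.foldl (pvStepF rk1) (acc.map (fun p => (p.1 + 1, p.2)))
        = (allowed.foldl (pvStepF rk2) acc).map (fun p => (p.1 + 1, p.2)) := by
  intro allowed
  induction allowed with
  | nil => intro acc _; rfl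
  | cons a rest ih =>
    intro acc hsh
    have hstep : pvStepF rk1 (acc.map (fun p => (p.1 + 1, p.2))) a
        = (pvStepF rk2 acc a).map (fun p => (p.1 + 1, p.2)) := by
      unfold pvStepF
      rw [hsh a (by simp)]
      cases h : rk2 a with
      | none => simp
      | some r =>
        cases acc with
        | none => simp
        | some p =>
          by_cases hlt : r < p.1
          · simp [hlt]
          · simp [hlt]
    simp only [List.foldl_cons, hstep]
    exact ih _ (fun a ha => hsh a (by simp [ha]))

-- with no ranked action the pass keeps its accumulator
theorem pvFold_none (rk : String → Option Int) :
    ∀ (allowed : List String) (acc : Option (Int × String)),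
      (∀ a ∈ allowed, rk a = none) →
      allowed.foldl (pvStepF rk) acc = acc := by
  intro allowed
  induction allowed with
  | nil => intro acc _; rfl
  | cons a rest ih =>
    intro acc h
    have : pvStepF rk acc a = acc := by unfold pvStepF; rw [h a (by simp)]
    simp only [List.foldl_cons, this]
    exact ih _ (fun a ha => h a (by simp [ha]))

-- pvRk on a cons: head gets 0, tail ranks shift by one
theorem pvRk_cons (c : String) (cs : List String) (a : String) :
    pvRk (c :: cs) a = if c = a then some 0 else (pvRk cs a).map (· + 1) := by
  by_cases h : c = a
  · simp [pvRk, pvIdx, h]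
  · cases hpi : pvIdx cs a with
    | none => simp [pvRk, pvIdx, h, hpi]
    | some k =>
      simp only [pvRk, pvIdx, if_neg h, hpi, Option.map_some, Option.some.injEq]
      push_cast
      ring

-- MAIN: the minimum-rank pass over allowed equals the first candidate found in allowed
theorem pvMain (cands : List String) (hnd : cands.Nodup) (allowed : List String) :
    (allowed.foldl (pvStepF (pvRk cands)) none).map Prod.snd
      = cands.find? (fun c => allowed.contains c) := by
  induction cands generalizing allowed with
  | nil =>
    rw [pvFold_none _ allowed none (fun a _ => by simp [pvRk, pvIdx])]
    rfl
  | cons c cs ih =>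
    rw [List.nodup_cons] at hnd
    by_cases hc : allowed.contains c
    · have hfold : allowed.foldl (pvStepF (pvRk (c :: cs))) none = some (0, c) := by
        apply pvFold_zero _ c (pvRk_nonneg _)
        · intro a ha
          rw [pvRk_cons] at ha
          by_cases h : c = a
          · exact h.symm
          · rw [if_neg h] at ha
            rcases Option.map_eq_some_iff.mp ha with ⟨r, hr, hr1⟩
            have := pvRk_nonneg cs a r hr
            omega
        · simp [pvRk_cons]
        · exact List.contains_iff_mem.mp hc
        · left; rfl
      have hmem : c ∈ allowed := by simpa using hc
      rw [hfold]
      simp [List.find?, hmem]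
    · have hshift : ∀ a ∈ allowed, pvRk (c :: cs) a = (pvRk cs a).map (· + 1) := by
        intro a ha
        rw [pvRk_cons, if_neg]
        intro h
        have hcm : c ∉ allowed := by simpa using hc
        exact hcm (h ▸ ha)
      have := pvFold_shift (pvRk (c :: cs)) (pvRk cs) allowed none hshift
      simp only [Option.map_none] at this
      rw [this, Option.map_map]
      have hsnd : (Prod.snd ∘ fun p : Int × String => (p.1 + 1, p.2)) = Prod.snd := by
        funext p; rfl
      have hmem : c ∉ allowed := by simpa using hc
      rw [hsnd, ih hnd.2 allowed]
      simp [List.find?, hmem]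

-- assembling both ports' tails for a concrete candidate split
theorem pvFinal_aux (g1 g2 g3 allowed : List String) (hnd : (g1 ++ g2 ++ g3).Nodup) :
    (match pvLoopA g1 allowed with
     | some o => o
     | none =>
       match pvLoopA g2 allowed with
       | some o => o
       | none =>
         match pvLoopA g3 allowed with
         | some o => o
         | none => allowed.headD "") =
    (match allowed.foldl (pvStep (pvRank (g1 ++ g2 ++ g3))) none with
     | some best => best.2
     | none => allowed.headD "") := by
  rw [pvStep_eq_stepF _ hnd]
  have hmain := pvMain _ hnd allowed
  rcases hfold : allowed.foldl (pvStepF (pvRk (g1 ++ g2 ++ g3))) none with _ | best <;>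
    rw [hfold] at hmain <;>
    simp only [Option.map_none, Option.map_some] at hmain <;>
    rcases h1 : g1.find? (fun c => decide (c ∈ allowed)) with _ | o1 <;>
      rcases h2 : g2.find? (fun c => decide (c ∈ allowed)) with _ | o2 <;>
        rcases h3 : g3.find? (fun c => decide (c ∈ allowed)) with _ | o3 <;>
          simp [List.find?_append, h1, h2, h3, Option.or] at hmain <;>
            simp [pvLoopA_eq_find?, h1, h2, h3, hmain]

-- ===== VERDICT (by name: the statement is the Claim_ definition above) =====
theorem pick_action_py_spec : Claim_equal_pick_action_py := by
  intro content allowed _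
  unfold Spec_pick_action_py pick_action_py pick_action_py_alt
  by_cases he : allowed.isEmpty
  · simp [he]
  · simp only [he]
    by_cases hcoach : PySem.Str.isIn "agent_type=coach" content <;>
      by_cases href : PySem.Str.isIn "agent_type=referee" content <;>
        simp only [hcoach, href, if_true] <;>
        [exact pvFinal_aux ["spread_pnr", "switch", "man", "motion"] ["play_on", "no_call"]
           ["come_to_ball", "get_open", "contain", "screen", "shoot",
            "secure", "box_out", "tag", "reset"] allowed (by decide);
         exact pvFinal_aux ["spread_pnr", "switch", "man", "motion"] []
           ["come_to_ball", "get_open", "contain", "screen", "shoot",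
            "secure", "box_out", "tag", "reset"] allowed (by decide);
         exact pvFinal_aux [] ["play_on", "no_call"]
           ["come_to_ball", "get_open", "contain", "screen", "shoot",
            "secure", "box_out", "tag", "reset"] allowed (by decide);
         exact pvFinal_aux [] []
           ["come_to_ball", "get_open", "contain", "screen", "shoot",
            "secure", "box_out", "tag", "reset"] allowed (by decide)]
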